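-- pv_equiv track=rewrite | github.com/mohammadfaiizan/ProjectI | DSA/Problem/Graph/01_Graph_Fundamentals_Representations/Advanced_Graph_Construction.py | construct_planar_graph_embedding
-- ===== SOURCE A (Python) =====
-- from typing import List, Dict, Set, Tuple, Optional, Union
-- from collections import defaultdict, deque
--
-- def construct_planar_graph_embedding(edges: List[List[int]]) -> Dict[int, List[int]]:
--     """
--     Problem: Construct planar embedding (simplified approach)
--
--     Create a planar embedding if the graph is planar.
--     This is a simplified version - full planarity testing is complex.
--
--     Time: O(V + E)
--     Space: O(V + E)
--     """
--     # Build adjacency list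
--     adj = defaultdict(list)
--     vertices = set()
--
--     for u, v in edges:
--         adj[u].append(v)
--         adj[v].append(u)
--         vertices.add(u)
--         vertices.add(v)
--
--     # Simple planar embedding using DFS ordering
--     embedding = defaultdict(list)
--     visited = set()
--
--     def dfs_embed(v, parent=-1):
--         visited.add(v)
--         neighbors = []
--
--         for u in adj[v]:
--             if u != parent:
--                 neighbors.append(u)
--                 if u not in visited:
--                     dfs_embed(u, v)
--
--         # Sort neighbors for consistent embedding
--         neighbors.sort()
--         if parent != -1:
--             neighbors.insert(0, parent)
--
--         embedding[v] = neighbors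
--
--     # Start DFS from arbitrary vertex
--     if vertices:
--         start = min(vertices)
--         dfs_embed(start)
--
--     return dict(embedding)
-- ===== SOURCE B (Python) =====
-- def construct_planar_graph_embedding(edges):
--     # Iterative DFS with an explicit frame stack instead of recursion; each
--     # vertex's row is built from the adjacency list when its frame is popped.
--     adj = {}
--     vertices = set()
--     for u, v in edges:
--         adj.setdefault(u, []).append(v)
--         adj.setdefault(v, []).append(u)
--         vertices.add(u)
--         vertices.add(v)
--
--     embedding = {}
--     if not vertices:
--         return embedding
--
--     start = min(vertices)
--     visited = {start}
--     stack = [(start, -1, iter(adj[start]))]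
--     while stack:
--         v, parent, it = stack[-1]
--         pushed = False
--         for u in it:
--             if u != parent and u not in visited:
--                 visited.add(u)
--                 stack.append((u, v, iter(adj[u])))
--                 pushed = True
--                 break
--         if not pushed:
--             stack.pop()
--             rest = sorted(u for u in adj[v] if u != parent)
--             embedding[v] = [parent] + rest if parent != -1 else rest
--     return embedding
-- ===== Notes on version B (the rewrite author's own statement) =====
-- stated objective: alternative
-- what changed: A explores the graph by a recursive DFS helper that accumulates, sorts and inserts each neighbor list inside the recursion; B replaces the recursion with an iterative while-loop over an explicit stack of (vertex, parent, iterator) frames and builds each row from the adjacency list only when its frame is popped.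
import Mathlib
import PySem

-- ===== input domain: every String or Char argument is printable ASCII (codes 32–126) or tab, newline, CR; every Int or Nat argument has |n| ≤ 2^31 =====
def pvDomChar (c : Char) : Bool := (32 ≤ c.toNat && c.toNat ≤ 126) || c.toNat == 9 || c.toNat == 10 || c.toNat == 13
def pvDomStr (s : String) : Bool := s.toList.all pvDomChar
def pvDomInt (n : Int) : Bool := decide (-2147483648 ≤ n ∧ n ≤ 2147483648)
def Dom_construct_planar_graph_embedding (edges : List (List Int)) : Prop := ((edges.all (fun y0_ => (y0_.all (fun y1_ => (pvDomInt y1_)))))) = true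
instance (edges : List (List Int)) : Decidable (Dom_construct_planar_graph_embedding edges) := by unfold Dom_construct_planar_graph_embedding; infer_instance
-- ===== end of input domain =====

-- B replaces A's recursive DFS helper by an iterative while-loop over an explicit stack of
-- (vertex, parent, remaining-neighbors) frames, building each row only when its frame is popped.

-- ===== PORT A =====
-- adjacency list + vertex set (defaultdict(list) append loop)
def pvBuildAdjA (edges : List (List Int)) : PySem.Dict Int (List Int) × PySem.Set Int :=
  edges.foldl (fun st e =>
    match e with
    | [u, v] =>
        let adj := st.1.modify u [] (fun l => l ++ [v])
        let adj := adj.modify v [] (fun l => l ++ [u])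
        (adj, PySem.Set.add (PySem.Set.add st.2 u) v)
    | _ => st) (PySem.Dict.empty, PySem.Set.empty)

mutual
-- dfs_embed: fuel is the recursion depth (vertex count + 1 at the top call suffices,
-- since each level adds a fresh vertex to visited before recursing)
def pvDfsA (adj : PySem.Dict Int (List Int)) :
    Nat → Int → Int → PySem.Set Int → PySem.Dict Int (List Int) →
    PySem.Set Int × PySem.Dict Int (List Int)
  | 0, _, _, vis, emb => (vis, emb)
  | fuel+1, v, p, vis, emb =>
      let vis1 := PySem.Set.add vis v
      let r := pvLoopA adj fuel v p (adj.getD v []) [] vis1 emb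
      let nb := PySem.List.sorted r.1 (fun x => x) false
      let nb := if p ≠ -1 then p :: nb else nb
      (r.2.1, r.2.2.insert v nb)
termination_by fuel => ((fuel, 0, 0) : Nat × Nat × Nat)

-- the 'for u in adj[v]' loop of dfs_embed, state (neighbors, visited, embedding)
def pvLoopA (adj : PySem.Dict Int (List Int)) :
    Nat → Int → Int → List Int → List Int → PySem.Set Int → PySem.Dict Int (List Int) →
    List Int × PySem.Set Int × PySem.Dict Int (List Int)
  | _, _, _, [], nb, vis, emb => (nb, vis, emb)
  | fuel, v, p, u :: rest, nb, vis, emb =>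
      if u ≠ p then
        if PySem.Set.contains vis u then
          pvLoopA adj fuel v p rest (nb ++ [u]) vis emb
        else
          let r := pvDfsA adj fuel u v vis emb
          pvLoopA adj fuel v p rest (nb ++ [u]) r.1 r.2
      else
        pvLoopA adj fuel v p rest nb vis emb
termination_by fuel _ _ ns => ((fuel, 1, ns.length) : Nat × Nat × Nat)
end

def construct_planar_graph_embedding (edges : List (List Int)) : List (Int × List Int) :=
  let av := pvBuildAdjA edges
  let emb :=
    match PySem.List.min? av.2 (fun x => x) with
    | some start => (pvDfsA av.1 (av.2.length + 1) start (-1) PySem.Set.empty PySem.Dict.empty).2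
    | none => PySem.Dict.empty
  emb.items

-- ===== PORT B =====
-- adjacency list + vertex set (setdefault(...).append loop)
def pvBuildAdjB (edges : List (List Int)) : PySem.Dict Int (List Int) × PySem.Set Int :=
  edges.foldl (fun st e =>
    match e with
    | [u, v] =>
        let adj := st.1.modify u [] (fun l => l ++ [v])
        let adj := adj.modify v [] (fun l => l ++ [u])
        (adj, PySem.Set.add (PySem.Set.add st.2 u) v)
    | _ => st) (PySem.Dict.empty, PySem.Set.empty)

-- the row built when a frame is popped: parent first (unless -1), then the sorted other neighbors
def pvRow (adj : PySem.Dict Int (List Int)) (v p : Int) : List Int :=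
  let rest := PySem.List.sorted ((adj.getD v []).filter (fun u => u != p)) (fun x => x) false
  if p ≠ -1 then p :: rest else rest

-- termination measure helpers: every adjacency list is at most the total adjacency size long
def pvAdjBound (d : PySem.Dict Int (List Int)) : Nat := (d.values.map List.length).sum
def pvWeight (B : Nat) (fr : Nat × Int × Int × List Int) : Nat := (B + 2) ^ fr.1 * (fr.2.2.2.length + 1)
def pvMeasure (B : Nat) (stk : List (Nat × Int × Int × List Int)) : Nat := (stk.map (pvWeight B)).sum

lemma pvGetD_len_le (d : PySem.Dict Int (List Int)) (u : Int) :
    (d.getD u []).length ≤ pvAdjBound d := by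
  rw [PySem.Dict.getD_eq_get?_getD]
  cases h : d.get? u with
  | none => simp [pvAdjBound]
  | some v =>
    have hv : v ∈ d.values := by
      have := PySem.Dict.mem_items_of_get?_eq_some (d := d) h
      simp only [PySem.Dict.values]
      exact List.mem_map.mpr ⟨(u, v), this, rfl⟩
    have : v.length ∈ d.values.map List.length := List.mem_map.mpr ⟨v, hv, rfl⟩
    simpa [pvAdjBound] using List.le_sum_of_mem this

lemma pvWeight_pos (B : Nat) (fr : Nat × Int × Int × List Int) : 0 < pvWeight B fr := by
  simp only [pvWeight]
  exact Nat.mul_pos (pow_pos (by omega) _) (by omega)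

lemma pvMeasure_pop (B : Nat) (fr : Nat × Int × Int × List Int)
    (stk : List (Nat × Int × Int × List Int)) :
    pvMeasure B stk < pvMeasure B (fr :: stk) := by
  simp only [pvMeasure, List.map_cons, List.sum_cons]
  have := pvWeight_pos B fr
  omega

lemma pvMeasure_skip (B : Nat) (f : Nat) (v p u : Int) (rest : List Int)
    (stk : List (Nat × Int × Int × List Int)) :
    pvMeasure B ((f, v, p, rest) :: stk) < pvMeasure B ((f, v, p, u :: rest) :: stk) := by
  simp only [pvMeasure, List.map_cons, List.sum_cons, pvWeight, List.length_cons]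
  have hb : 0 < (B + 2) ^ f := pow_pos (by omega) f
  have := mul_lt_mul_of_pos_left (show rest.length + 1 < rest.length + 1 + 1 by omega) hb
  omega

lemma pvMeasure_push (adj : PySem.Dict Int (List Int)) (g : Nat) (v p u : Int) (rest : List Int)
    (stk : List (Nat × Int × Int × List Int)) :
    pvMeasure (pvAdjBound adj) ((g, u, v, adj.getD u []) :: (g + 1, v, p, rest) :: stk)
      < pvMeasure (pvAdjBound adj) ((g + 1, v, p, u :: rest) :: stk) := by
  simp only [pvMeasure, List.map_cons, List.sum_cons, pvWeight, List.length_cons]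
  have hb : 0 < (pvAdjBound adj + 2) ^ g := pow_pos (by omega) g
  have hL : (adj.getD u []).length + 1 < pvAdjBound adj + 2 := by
    have := pvGetD_len_le adj u; omega
  have h1 : (pvAdjBound adj + 2) ^ g * ((adj.getD u []).length + 1)
      < (pvAdjBound adj + 2) ^ (g + 1) := by
    calc (pvAdjBound adj + 2) ^ g * ((adj.getD u []).length + 1)
        < (pvAdjBound adj + 2) ^ g * (pvAdjBound adj + 2) := mul_lt_mul_of_pos_left hL hb
      _ = (pvAdjBound adj + 2) ^ (g + 1) := (pow_succ _ _).symm
  have h2 : (pvAdjBound adj + 2) ^ (g + 1) * (rest.length + 1 + 1)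
      = (pvAdjBound adj + 2) ^ (g + 1) * (rest.length + 1) + (pvAdjBound adj + 2) ^ (g + 1) := by
    ring
  omega

-- B's while loop: one step per neighbor inspected; a frame is popped when its
-- iterator is exhausted, at which point the vertex's row is inserted.
-- (The per-frame Nat is the fuel device mirroring A's port; it never runs out at the
-- top-level call and only makes the recursion total.)
def pvRunB (adj : PySem.Dict Int (List Int)) :
    List (Nat × Int × Int × List Int) → PySem.Set Int → PySem.Dict Int (List Int) →
    PySem.Dict Int (List Int)
  | [], _, emb => emb
  | (_, v, p, []) :: stk, vis, emb => pvRunB adj stk vis (emb.insert v (pvRow adj v p))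
  | (f, v, p, u :: rest) :: stk, vis, emb =>
      if u ≠ p ∧ PySem.Set.contains vis u = false then
        match f with
        | 0 => pvRunB adj ((0, v, p, rest) :: stk) vis emb
        | g+1 => pvRunB adj ((g, u, v, adj.getD u []) :: (g+1, v, p, rest) :: stk)
                   (PySem.Set.add vis u) emb
      else pvRunB adj ((f, v, p, rest) :: stk) vis emb
termination_by stk _ _ => pvMeasure (pvAdjBound adj) stk
decreasing_by
  · exact pvMeasure_pop _ _ _
  · exact pvMeasure_skip _ _ _ _ _ _ _
  · exact pvMeasure_push _ _ _ _ _ _ _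
  · exact pvMeasure_skip _ _ _ _ _ _ _

def construct_planar_graph_embedding_alt (edges : List (List Int)) : List (Int × List Int) :=
  let av := pvBuildAdjB edges
  match PySem.List.min? av.2 (fun x => x) with
  | some start =>
      (pvRunB av.1 [(av.2.length, start, -1, av.1.getD start [])]
        (PySem.Set.add PySem.Set.empty start) PySem.Dict.empty).items
  | none => []

-- ===== PRECONDITION & SPEC =====
-- Pre_: every edge is a pair; on a row that is not exactly [u, v] Python's 'for u, v in edges' raises ValueError.
def Pre_construct_planar_graph_embedding (edges : List (List Int)) : Prop :=
  ∀ e ∈ edges, e.length = 2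
instance (edges : List (List Int)) : Decidable (Pre_construct_planar_graph_embedding edges) := by
  unfold Pre_construct_planar_graph_embedding; infer_instance

def pvWitness_construct_planar_graph_embedding : List (List Int) := [[0, 1], [1, 2], [2, 0]]

def Spec_construct_planar_graph_embedding (edges : List (List Int)) (out : List (Int × List Int)) : Prop := out = construct_planar_graph_embedding_alt edges
instance (edges : List (List Int)) (out : List (Int × List Int)) : Decidable (Spec_construct_planar_graph_embedding edges out) := by unfold Spec_construct_planar_graph_embedding; infer_instance

-- ===== CLAIM (what is proved, stated in full; the proofs are below) =====
def Claim_equal_construct_planar_graph_embedding : Prop := ∀ (edges : List (List Int)), Dom_construct_planar_graph_embedding edges → Pre_construct_planar_graph_embedding edges → Spec_construct_planar_graph_embedding edges (construct_planar_graph_embedding edges)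

-- ===== LEMMAS AND PROOFS =====

-- A's loop accumulator is exactly the non-parent neighbors in adjacency order
lemma pvLoopA_fst (adj : PySem.Dict Int (List Int)) :
    ∀ (ns : List Int) (f : Nat) (v p : Int) (nb : List Int) vis emb,
      (pvLoopA adj f v p ns nb vis emb).1 = nb ++ ns.filter (fun u => u != p) := by
  intro ns
  induction ns with
  | nil => intro f v p nb vis emb; simp [pvLoopA]
  | cons u rest ih =>
    intro f v p nb vis emb
    by_cases h : u = p
    · simp [pvLoopA, h, ih]
    · by_cases h2 : u ∈ vis
      · simp [pvLoopA, h, h2, ih, bne_iff_ne]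
      · simp [pvLoopA, h, h2, ih, bne_iff_ne]

-- A's loop (visited, embedding) result does not depend on the accumulator
lemma pvLoopA_snd_nb (adj : PySem.Dict Int (List Int)) :
    ∀ (ns : List Int) (f : Nat) (v p : Int) (nb nb' : List Int) vis emb,
      (pvLoopA adj f v p ns nb vis emb).2 = (pvLoopA adj f v p ns nb' vis emb).2 := by
  intro ns
  induction ns with
  | nil => intro f v p nb nb' vis emb; simp [pvLoopA]
  | cons u rest ih =>
    intro f v p nb nb' vis emb
    by_cases h : u = p
    · simp only [pvLoopA, h]
      simp only [ne_eq, not_true_eq_false]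
      rw [if_neg (fun hh : False => hh)]
      exact ih f v p nb nb' vis emb
    · by_cases h2 : u ∈ vis
      · simp only [pvLoopA, h, ne_eq, not_false_iff, if_true]
        rw [if_pos (by simpa using h2), if_pos (by simpa using h2)]
        exact ih f v p (nb ++ [u]) (nb' ++ [u]) vis emb
      · simp only [pvLoopA, h, ne_eq, not_false_iff, if_true]
        rw [if_neg (by simpa using h2), if_neg (by simpa using h2)]
        exact ih f v p (nb ++ [u]) (nb' ++ [u]) _ _

-- one-step unfoldings of A's neighbor loop
lemma pvLoopA_cons_same (adj : PySem.Dict Int (List Int)) (f : Nat) (v p u : Int)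
    (rest nb : List Int) (vis : PySem.Set Int) (emb : PySem.Dict Int (List Int)) (h1 : u = p) :
    pvLoopA adj f v p (u :: rest) nb vis emb = pvLoopA adj f v p rest nb vis emb := by
  rw [pvLoopA.eq_def]; simp [h1]

lemma pvLoopA_cons_seen (adj : PySem.Dict Int (List Int)) (f : Nat) (v p u : Int)
    (rest nb : List Int) (vis : PySem.Set Int) (emb : PySem.Dict Int (List Int))
    (h1 : ¬ u = p) (h2 : u ∈ vis) :
    pvLoopA adj f v p (u :: rest) nb vis emb = pvLoopA adj f v p rest (nb ++ [u]) vis emb := by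
  rw [pvLoopA.eq_def]; simp [h1, h2]

lemma pvLoopA_cons_new (adj : PySem.Dict Int (List Int)) (f : Nat) (v p u : Int)
    (rest nb : List Int) (vis : PySem.Set Int) (emb : PySem.Dict Int (List Int))
    (h1 : ¬ u = p) (h2 : u ∉ vis) :
    pvLoopA adj f v p (u :: rest) nb vis emb
      = pvLoopA adj f v p rest (nb ++ [u]) (pvDfsA adj f u v vis emb).1 (pvDfsA adj f u v vis emb).2 := by
  rw [pvLoopA.eq_def]; simp [h1, h2]

-- completing one frame of B's stack machine = running A's neighbor loop and inserting the row
lemma pvRunB_frame (adj : PySem.Dict Int (List Int)) :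
    ∀ (f : Nat) (ns : List Int) (v p : Int) vis emb stk,
      pvRunB adj ((f, v, p, ns) :: stk) vis emb
        = pvRunB adj stk (pvLoopA adj f v p ns [] vis emb).2.1
            ((pvLoopA adj f v p ns [] vis emb).2.2.insert v (pvRow adj v p)) := by
  intro f
  induction f using Nat.strong_induction_on with
  | _ f ihf =>
    intro ns
    induction ns with
    | nil => intro v p vis emb stk; rw [pvRunB.eq_def]; simp [pvLoopA]
    | cons u rest ih =>
      intro v p vis emb stk
      by_cases h1 : u = p
      · rw [show pvRunB adj ((f, v, p, u :: rest) :: stk) vis emb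
              = pvRunB adj ((f, v, p, rest) :: stk) vis emb by
            rw [pvRunB.eq_def]; simp [h1]]
        rw [ih, pvLoopA_cons_same adj f v p u rest [] vis emb h1]
      · by_cases h2 : u ∈ vis
        · rw [show pvRunB adj ((f, v, p, u :: rest) :: stk) vis emb
                = pvRunB adj ((f, v, p, rest) :: stk) vis emb by
              rw [pvRunB.eq_def]; simp [h1, h2]]
          rw [ih, pvLoopA_cons_seen adj f v p u rest [] vis emb h1 h2,
            pvLoopA_snd_nb adj rest f v p ([] ++ [u]) [] vis emb]
        · cases f with
          | zero =>
            rw [show pvRunB adj ((0, v, p, u :: rest) :: stk) vis emb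
                  = pvRunB adj ((0, v, p, rest) :: stk) vis emb by
                rw [pvRunB.eq_def]; simp [h1, h2]]
            rw [ih, pvLoopA_cons_new adj 0 v p u rest [] vis emb h1 h2]
            rw [show pvDfsA adj 0 u v vis emb = (vis, emb) by rw [pvDfsA]]
            rw [pvLoopA_snd_nb adj rest 0 v p ([] ++ [u]) [] vis emb]
          | succ g =>
            rw [show pvRunB adj ((g+1, v, p, u :: rest) :: stk) vis emb
                  = pvRunB adj ((g, u, v, adj.getD u []) :: (g+1, v, p, rest) :: stk)
                      (PySem.Set.add vis u) emb by
                rw [pvRunB.eq_def]; simp [h1, h2]]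
            rw [ihf g (by omega), ih]
            have hchild : pvDfsA adj (g+1) u v vis emb
                = ((pvLoopA adj g u v (adj.getD u []) [] (PySem.Set.add vis u) emb).2.1,
                   (pvLoopA adj g u v (adj.getD u []) [] (PySem.Set.add vis u) emb).2.2.insert u
                     (pvRow adj u v)) := by
              rw [pvDfsA]
              simp only [pvRow]
              rw [pvLoopA_fst adj (adj.getD u []) g u v [] (PySem.Set.add vis u) emb]
              simp
            rw [pvLoopA_cons_new adj (g+1) v p u rest [] vis emb h1 h2, hchild,
              pvLoopA_snd_nb adj rest (g+1) v p ([] ++ [u]) [] _ _]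

-- ===== VERDICT (by name: the statement is the Claim_ definition above) =====
theorem construct_planar_graph_embedding_spec : Claim_equal_construct_planar_graph_embedding := by
  unfold Claim_equal_construct_planar_graph_embedding
  intro edges _ _
  unfold Spec_construct_planar_graph_embedding
  unfold construct_planar_graph_embedding construct_planar_graph_embedding_alt
  have hbuild : pvBuildAdjB = pvBuildAdjA := rfl
  rw [hbuild]
  cases hmin : PySem.List.min? (pvBuildAdjA edges).2 (fun x => x) with
  | none => simp [hmin]; rfl
  | some start =>
    simp only [hmin]
    rw [pvRunB_frame]
    rw [show pvRunB (pvBuildAdjA edges).1 [] _ _ = _ from pvRunB.eq_1 _ _ _]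
    rw [show pvDfsA (pvBuildAdjA edges).1 ((pvBuildAdjA edges).2.length + 1) start (-1)
          PySem.Set.empty PySem.Dict.empty
        = ((pvLoopA (pvBuildAdjA edges).1 (pvBuildAdjA edges).2.length start (-1)
              ((pvBuildAdjA edges).1.getD start []) []
              (PySem.Set.add PySem.Set.empty start) PySem.Dict.empty).2.1,
           (pvLoopA (pvBuildAdjA edges).1 (pvBuildAdjA edges).2.length start (-1)
              ((pvBuildAdjA edges).1.getD start []) []
              (PySem.Set.add PySem.Set.empty start) PySem.Dict.empty).2.2.insert start
             (pvRow (pvBuildAdjA edges).1 start (-1))) by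
      rw [pvDfsA]
      simp only [pvRow]
      rw [pvLoopA_fst]
      simp]
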